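-- pv_equiv track=rewrite | github.com/Wildst/AdventOfCode | 2024/day_08.py | simplify_direction
-- ===== SOURCE A (Python) =====
-- def simplify_direction( x, y ):
--     i = 2
--     while i < x:
--         if x % i or y % i:
--             i += 1
--         else:
--             x = x // i
--             y = y // i
--     return x, y
-- ===== SOURCE B (Python) =====
-- def simplify_direction(x, y):
--     # Reduce the vector by its gcd, computed with Euclid's algorithm.
--     a, b = abs(x), abs(y)
--     while b:
--         a, b = b, a % b
--     if a:
--         return x // a, y // a
--     return x, y
-- ===== Notes on version B (the rewrite author's own statement) =====
-- stated objective: faster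
-- what changed: B replaces A's trial-division loop bounded by x with Euclid's gcd followed by a single division of both components.
-- intended difference: On inputs where x <= 2 with gcd(x,y) > 1 (A's loop never runs, so negative or small vectors stay unreduced) and on inputs where x > 2 divides y (A stops once the remaining x equals the trial divisor, leaving the largest prime factor of x), A returns a vector that is not fully reduced; B returns (x//g, y//g) with g = gcd(x,y), the intended simplified direction. — e.g. on simplify_direction(3, 6): A returns [3, 6], B returns [1, 2]
import Mathlib
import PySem

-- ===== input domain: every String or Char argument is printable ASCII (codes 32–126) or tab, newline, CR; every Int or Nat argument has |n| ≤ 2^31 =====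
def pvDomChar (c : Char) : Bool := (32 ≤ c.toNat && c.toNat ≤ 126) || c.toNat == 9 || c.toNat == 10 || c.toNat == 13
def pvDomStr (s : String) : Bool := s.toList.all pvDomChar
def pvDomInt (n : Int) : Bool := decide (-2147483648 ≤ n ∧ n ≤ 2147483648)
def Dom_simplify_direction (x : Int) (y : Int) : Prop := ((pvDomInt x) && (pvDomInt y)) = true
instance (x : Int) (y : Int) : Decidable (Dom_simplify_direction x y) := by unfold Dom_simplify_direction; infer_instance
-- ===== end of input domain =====

-- B reduces the vector by its Euclid-computed gcd in one division instead of A's trial-division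
-- loop bounded by x; on D_ (x ≤ 2 with a nontrivial gcd, or x > 2 dividing y) A leaves the vector
-- only partially reduced and B returns the fully reduced one.

-- termination helper for A's loop (a / b shrinks strictly)
theorem pv_ediv_lt_self {a b : Int} (ha : 0 < a) (hb : 1 < b) : a / b < a := by
  have hm : a < a * b := by nlinarith
  have := Int.ediv_lt_iff_lt_mul (a := a) (b := a) (c := b) (by omega)
  omega

-- ===== PORT A =====
-- the while loop; the loop counter i only ever grows from 2, so it is carried as i = 2 + j
def simplify_directionLoop (j : Nat) (x y : Int) : List Int :=
  if h : 2 + (j : Int) < x then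
    if hm : PySem.Int.mod x (2 + (j : Int)) ≠ 0 ∨ PySem.Int.mod y (2 + (j : Int)) ≠ 0 then
      simplify_directionLoop (j + 1) x y
    else
      simplify_directionLoop j (PySem.Int.floordiv x (2 + (j : Int)))
        (PySem.Int.floordiv y (2 + (j : Int)))
  else [x, y]
termination_by (x.toNat, (x - (2 + (j : Int))).toNat)
decreasing_by
  · apply Prod.Lex.right
    push_cast
    omega
  · apply Prod.Lex.left
    have hi : (0 : Int) < 2 + (j : Int) := by omega
    rw [PySem.Int.floordiv_eq_ediv_of_pos hi]
    have hx : 0 < x := by omega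
    have := pv_ediv_lt_self hx (show (1 : Int) < 2 + (j : Int) by omega)
    omega

def simplify_direction (x : Int) (y : Int) : List Int :=
  simplify_directionLoop 0 x y

-- ===== PORT B =====
-- Euclid's loop: while b: a, b = b, a % b
def simplify_directionGcd (a b : Int) : Int :=
  if hb : b ≠ 0 then simplify_directionGcd b (PySem.Int.mod a b) else a
termination_by b.natAbs
decreasing_by
  rcases lt_or_gt_of_ne hb with hneg | hpos
  · have := PySem.Int.mod_neg_bounds a hneg
    omega
  · have h1 := PySem.Int.mod_nonneg a hpos
    have h2 := PySem.Int.mod_lt a hpos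
    omega

def simplify_direction_alt (x : Int) (y : Int) : List Int :=
  let a := simplify_directionGcd |x| |y|
  if a ≠ 0 then [PySem.Int.floordiv x a, PySem.Int.floordiv y a] else [x, y]

-- ===== PRECONDITION & SPEC =====
-- On x ≤ 2 with gcd(x,y) > 1 A's loop never runs and the vector stays unreduced; on x > 2 dividing y
-- A stops at the largest prime factor of x; B returns the fully reduced (x//g, y//g), the
-- intended simplified direction vector.
def D_simplify_direction (x : Int) (y : Int) : Prop :=
  (x ≤ 2 ∧ 1 < ((Int.gcd x y : Nat) : Int)) ∨ (2 < x ∧ x ∣ y)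
instance (x : Int) (y : Int) : Decidable (D_simplify_direction x y) := by
  unfold D_simplify_direction; infer_instance

def Spec_simplify_direction (x : Int) (y : Int) (out : List Int) : Prop :=
  ¬ D_simplify_direction x y → out = simplify_direction_alt x y
instance (x : Int) (y : Int) (out : List Int) : Decidable (Spec_simplify_direction x y out) := by
  unfold Spec_simplify_direction; infer_instance

def pvDiffWitness_simplify_direction : Int × Int := (3, 6)
def pvDiffWitnessOut_simplify_direction : (List Int) × (List Int) := ([3, 6], [1, 2])

-- ===== CLAIM (what is proved, stated in full; the proofs are below) =====
def Claim_unchanged_simplify_direction : Prop := ∀ (x : Int) (y : Int), Dom_simplify_direction x y → Spec_simplify_direction x y (simplify_direction x y)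
def Claim_changed_simplify_direction : Prop := Dom_simplify_direction (pvDiffWitness_simplify_direction.1) (pvDiffWitness_simplify_direction.2) ∧ D_simplify_direction (pvDiffWitness_simplify_direction.1) (pvDiffWitness_simplify_direction.2) ∧ simplify_direction (pvDiffWitness_simplify_direction.1) (pvDiffWitness_simplify_direction.2) = pvDiffWitnessOut_simplify_direction.1 ∧ simplify_direction_alt (pvDiffWitness_simplify_direction.1) (pvDiffWitness_simplify_direction.2) = pvDiffWitnessOut_simplify_direction.2 ∧ pvDiffWitnessOut_simplify_direction.1 ≠ pvDiffWitnessOut_simplify_direction.2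
def Claim_exact_simplify_direction : Prop := ∀ (x : Int) (y : Int), Dom_simplify_direction x y → D_simplify_direction x y → simplify_direction x y ≠ simplify_direction_alt x y

-- ===== LEMMAS AND PROOFS =====

-- Euclid's loop computes the gcd
theorem pv_gcdLoop_eq : ∀ (a b : Int), 0 ≤ a → 0 ≤ b →
    simplify_directionGcd a b = ((Int.gcd a b : Nat) : Int) := by
  intro a b
  induction a, b using simplify_directionGcd.induct with
  | case1 a b hb0 ih =>
    intro ha hb
    have hbpos : 0 < b := by omega
    rw [simplify_directionGcd, dif_pos hb0,
      ih hb (PySem.Int.mod_nonneg a hbpos)]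
    congr 1
    rw [PySem.Int.mod_eq_emod_of_pos hbpos]
    have hma : a = ((a.toNat : Nat) : Int) := by omega
    have hmb : b = ((b.toNat : Nat) : Int) := by omega
    rw [hma, hmb, ← Int.natCast_mod]
    rw [Int.gcd_def, Int.gcd_def]
    simp only [Int.natAbs_natCast]
    rw [Nat.gcd_comm b.toNat, ← Nat.gcd_rec, Nat.gcd_comm]
  | case2 a b hb0 =>
    intro ha hb
    simp only [ne_eq, not_not] at hb0
    subst hb0
    rw [simplify_directionGcd, dif_neg (by simp), Int.gcd_zero_right]
    omega

-- dividing both arguments by a common divisor divides the gcd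
theorem pv_gcd_div_both {x y i : Int} (hi : 0 < i) (hdx : i ∣ x) (hdy : i ∣ y) :
    ((Int.gcd (x / i) (y / i) : Nat) : Int) = ((Int.gcd x y : Nat) : Int) / i := by
  have hiN : ((i.natAbs : Nat) : Int) = i := by omega
  rw [Int.gcd_def, Int.gcd_def,
    Int.natAbs_ediv_of_dvd hdx, Int.natAbs_ediv_of_dvd hdy,
    Nat.gcd_div (Int.natAbs_dvd_natAbs.mpr hdx) (Int.natAbs_dvd_natAbs.mpr hdy),
    Int.natCast_div, hiN]

-- a common divisor of x and y divides (the cast of) their gcd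
theorem pv_dvd_gcd {x y i : Int} (hi : 0 < i) (hdx : i ∣ x) (hdy : i ∣ y) :
    i ∣ ((Int.gcd x y : Nat) : Int) := by
  have h1 : ((i.toNat : Nat) : Int) = i := by omega
  have h2 : ((i.toNat : Nat) : Int) ∣ x := by rw [h1]; exact hdx
  have h3 : ((i.toNat : Nat) : Int) ∣ y := by rw [h1]; exact hdy
  have := Int.dvd_gcd (a := x) (b := y) (c := i.toNat) h2 h3
  exact h1 ▸ Int.natCast_dvd_natCast.mpr this

-- (x/i)/(g/i) = x/g for a chain of positive divisors
theorem pv_div_div {x g i : Int} (hi : 0 < i) (hig : i ∣ g) (hgx : g ∣ x) (hg : 0 < g) :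
    (x / i) / (g / i) = x / g := by
  obtain ⟨h, rfl⟩ := hig
  obtain ⟨m, rfl⟩ := hgx
  have hh : 0 < h := by nlinarith
  have r1 : i * h * m / i = h * m := by
    rw [show i * h * m = i * (h * m) by ring]
    exact Int.mul_ediv_cancel_left _ (by omega)
  have r2 : i * h / i = h := Int.mul_ediv_cancel_left _ (by omega)
  have r3 : i * h * m / (i * h) = m := Int.mul_ediv_cancel_left _ hg.ne'
  rw [r1, r2, r3]
  exact Int.mul_ediv_cancel_left _ (by omega)

-- main characterisation: when x > 0 and x does not divide y, A's loop fully reduces by the gcd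
theorem pv_loop_full : ∀ (j : Nat) (x y : Int), 0 < x → ¬ x ∣ y →
    (∀ d : Int, 2 ≤ d → d < 2 + (j : Int) → ¬(d ∣ x ∧ d ∣ y)) →
    simplify_directionLoop j x y =
      [x / ((Int.gcd x y : Nat) : Int), y / ((Int.gcd x y : Nat) : Int)] := by
  intro j x y
  induction j, x, y using simplify_directionLoop.induct with
  | case1 j x y h hm ih =>
    intro hx hnd hpre
    rw [simplify_directionLoop, dif_pos h, dif_pos hm]
    apply ih hx hnd
    intro d h2 hlt
    by_cases hd : d = 2 + (j : Int)
    · subst hd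
      rintro ⟨hdx, hdy⟩
      rcases hm with hm | hm
      · exact hm ((PySem.Int.mod_eq_zero_iff_dvd _ _).mpr hdx)
      · exact hm ((PySem.Int.mod_eq_zero_iff_dvd _ _).mpr hdy)
    · exact hpre d h2 (by push_cast at hlt ⊢; omega)
  | case2 j x y h hm ih =>
    intro hx hnd hpre
    rw [simplify_directionLoop, dif_pos h, dif_neg hm]
    push Not at hm
    have hi : (0 : Int) < 2 + (j : Int) := by omega
    have hdx : (2 + (j : Int)) ∣ x := (PySem.Int.mod_eq_zero_iff_dvd _ _).mp hm.1
    have hdy : (2 + (j : Int)) ∣ y := (PySem.Int.mod_eq_zero_iff_dvd _ _).mp hm.2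
    have hg : (0 : Int) < ((Int.gcd x y : Nat) : Int) := by
      exact_mod_cast Int.gcd_pos_of_ne_zero_left y (by omega)
    have hig : (2 + (j : Int)) ∣ ((Int.gcd x y : Nat) : Int) := pv_dvd_gcd hi hdx hdy
    have hgx : ((Int.gcd x y : Nat) : Int) ∣ x := Int.gcd_dvd_left x y
    have hgy : ((Int.gcd x y : Nat) : Int) ∣ y := Int.gcd_dvd_right x y
    rw [PySem.Int.floordiv_eq_ediv_of_pos hi, PySem.Int.floordiv_eq_ediv_of_pos hi] at ih ⊢
    have hx' : 0 < x / (2 + (j : Int)) := by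
      apply Int.ediv_pos_of_pos_of_dvd hx (by omega) hdx
    have hnd' : ¬ (x / (2 + (j : Int))) ∣ (y / (2 + (j : Int))) := by
      intro ⟨k, hk⟩
      apply hnd
      obtain ⟨m, hmx⟩ := hdx
      obtain ⟨n, hny⟩ := hdy
      refine ⟨k, ?_⟩
      have e1 : x / (2 + (j : Int)) = m := by rw [hmx, Int.mul_ediv_cancel_left _ (by omega)]
      have e2 : y / (2 + (j : Int)) = n := by rw [hny, Int.mul_ediv_cancel_left _ (by omega)]
      rw [e1] at hk; rw [e2] at hk
      rw [hny, hk, hmx]; ring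
    rw [ih hx' hnd' ?_, pv_gcd_div_both hi hdx hdy,
      pv_div_div hi hig hgx hg, pv_div_div hi hig hgy hg]
    intro d h2 hlt hdd
    obtain ⟨m, hmx⟩ := hdx
    obtain ⟨n, hny⟩ := hdy
    have e1 : x / (2 + (j : Int)) = m := by rw [hmx, Int.mul_ediv_cancel_left _ (by omega)]
    have e2 : y / (2 + (j : Int)) = n := by rw [hny, Int.mul_ediv_cancel_left _ (by omega)]
    rw [e1, e2] at hdd
    exact hpre d h2 hlt ⟨hmx ▸ hdd.1.mul_left _, hny ▸ hdd.2.mul_left _⟩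
  | case3 j x y h =>
    intro hx hnd hpre
    rw [simplify_directionLoop, dif_neg h]
    have hg : (0 : Int) < ((Int.gcd x y : Nat) : Int) := by
      exact_mod_cast Int.gcd_pos_of_ne_zero_left y (by omega)
    have hgx : ((Int.gcd x y : Nat) : Int) ∣ x := Int.gcd_dvd_left x y
    have hgy : ((Int.gcd x y : Nat) : Int) ∣ y := Int.gcd_dvd_right x y
    have hg1 : ((Int.gcd x y : Nat) : Int) = 1 := by
      by_contra hne
      have h2 : 2 ≤ ((Int.gcd x y : Nat) : Int) := by omega
      have hglt : ((Int.gcd x y : Nat) : Int) < x := by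
        rcases lt_or_eq_of_le (Int.le_of_dvd hx hgx) with hlt | heq
        · exact hlt
        · exact absurd (heq ▸ hgy) hnd
      exact hpre _ h2 (by omega) ⟨hgx, hgy⟩
    simp [hg1]

-- invariant: starting from x > 1, the first component of A's result stays > 1
theorem pv_loop_gt_one : ∀ (j : Nat) (x y : Int), 1 < x →
    ∃ a b, simplify_directionLoop j x y = [a, b] ∧ 1 < a := by
  intro j x y
  induction j, x, y using simplify_directionLoop.induct with
  | case1 j x y h hm ih =>
    intro hx
    rw [simplify_directionLoop, dif_pos h, dif_pos hm]
    exact ih hx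
  | case2 j x y h hm ih =>
    intro hx
    rw [simplify_directionLoop, dif_pos h, dif_neg hm]
    push Not at hm
    have hi : (0 : Int) < 2 + (j : Int) := by omega
    have hdx : (2 + (j : Int)) ∣ x := (PySem.Int.mod_eq_zero_iff_dvd _ _).mp hm.1
    apply ih
    rw [PySem.Int.floordiv_eq_ediv_of_pos hi]
    obtain ⟨m, hmx⟩ := hdx
    rw [hmx, Int.mul_ediv_cancel_left _ (by omega)]
    nlinarith [hmx ▸ h]
  | case3 j x y h =>
    intro hx
    exact ⟨x, y, by rw [simplify_directionLoop, dif_neg h], hx⟩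

-- B's port, rewritten through the gcd
theorem pv_alt_eq (x y : Int) :
    simplify_direction_alt x y =
      if ((Int.gcd x y : Nat) : Int) ≠ 0 then
        [x / ((Int.gcd x y : Nat) : Int), y / ((Int.gcd x y : Nat) : Int)]
      else [x, y] := by
  have habs : Int.gcd |x| |y| = Int.gcd x y := by
    rw [Int.gcd_def, Int.gcd_def, Int.natAbs_abs, Int.natAbs_abs]
  simp only [simplify_direction_alt,
    pv_gcdLoop_eq |x| |y| (abs_nonneg x) (abs_nonneg y), habs]
  split_ifs with h
  · have : (0 : Int) < ((Int.gcd x y : Nat) : Int) := by omega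
    rw [PySem.Int.floordiv_eq_ediv_of_pos this, PySem.Int.floordiv_eq_ediv_of_pos this]
  · rfl

-- ===== VERDICT (by name: the statement is the Claim_ definitions above) =====
theorem simplify_direction_spec : Claim_unchanged_simplify_direction := by
  intro x y _ hnD
  show simplify_direction x y = simplify_direction_alt x y
  unfold simplify_direction
  rw [pv_alt_eq]
  unfold D_simplify_direction at hnD
  push Not at hnD
  by_cases hx : 2 < x
  · have hnd : ¬ x ∣ y := hnD.2 hx
    have hg : (0 : Int) < ((Int.gcd x y : Nat) : Int) := by
      exact_mod_cast Int.gcd_pos_of_ne_zero_left y (by omega)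
    rw [pv_loop_full 0 x y (by omega) hnd (by intro d h2 hlt; push_cast at hlt; omega),
      if_pos (by omega)]
  · have hg1 : ((Int.gcd x y : Nat) : Int) ≤ 1 := hnD.1 (by omega)
    rw [simplify_directionLoop, dif_neg (by push_cast; omega)]
    rcases (by omega : ((Int.gcd x y : Nat) : Int) = 0 ∨ ((Int.gcd x y : Nat) : Int) = 1) with h0 | h1
    · rw [if_neg (by omega)]
    · rw [h1, if_pos (by omega)]
      simp

theorem simplify_direction_changed : Claim_changed_simplify_direction := by
  unfold Claim_changed_simplify_direction
  refine ⟨by decide, by decide, ?_, ?_, by decide⟩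
  · show simplify_direction 3 6 = [3, 6]
    unfold simplify_direction
    rw [simplify_directionLoop, dif_pos (by norm_num),
      dif_pos (by left; decide)]
    rw [simplify_directionLoop, dif_neg (by norm_num)]
  · show simplify_direction_alt 3 6 = [1, 2]
    rw [pv_alt_eq]
    norm_num

theorem simplify_direction_tight : Claim_exact_simplify_direction := by
  intro x y _ hD heq
  rw [pv_alt_eq] at heq
  unfold D_simplify_direction at hD
  rcases hD with ⟨hx2, hg⟩ | ⟨hx2, hdvd⟩
  · -- A returns [x, y] unreduced, B divides by g > 1
    unfold simplify_direction at heq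
    rw [simplify_directionLoop, dif_neg (by push_cast; omega), if_pos (by omega)] at heq
    simp only [List.cons.injEq, and_true] at heq
    set g : Int := ((Int.gcd x y : Nat) : Int) with hgdef
    obtain ⟨m, hmx⟩ : g ∣ x := by rw [hgdef]; exact Int.gcd_dvd_left x y
    obtain ⟨n, hny⟩ : g ∣ y := by rw [hgdef]; exact Int.gcd_dvd_right x y
    have ex : x / g = m := by rw [hmx, Int.mul_ediv_cancel_left _ (by omega)]
    have ey : y / g = n := by rw [hny, Int.mul_ediv_cancel_left _ (by omega)]
    have h1 : m = g * m := by
      have := heq.1.trans ex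
      omega
    have h2 : n = g * n := by
      have := heq.2.trans ey
      omega
    have hx0 : x = 0 := by
      rcases mul_eq_zero.mp (by linear_combination -h1 : (g - 1) * m = 0) with hc | hc
      · omega
      · omega
    have hy0 : y = 0 := by
      rcases mul_eq_zero.mp (by linear_combination -h2 : (g - 1) * n = 0) with hc | hc
      · omega
      · omega
    rw [hgdef, hx0, hy0] at hg
    norm_num [Int.gcd] at hg
  · -- x > 2 divides y: gcd = x, B's first component is 1, A's stays > 1
    have hgcd : ((Int.gcd x y : Nat) : Int) = x := by
      have hN : Int.gcd x y = x.natAbs := by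
        rw [Int.gcd_def]
        exact Nat.gcd_eq_left (Int.natAbs_dvd_natAbs.mpr hdvd)
      omega
    rw [if_pos (by omega), hgcd, Int.ediv_self (by omega)] at heq
    obtain ⟨a, b, hab, ha⟩ := pv_loop_gt_one 0 x y (by omega)
    unfold simplify_direction at heq
    rw [hab] at heq
    have : a = 1 := by simpa using congrArg (·.headI) heq
    omega
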